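-- pv_equiv track=rewrite | github.com/Bruno-rasq/Beecrowd-solutions | beginner/pagina04/1159/1159.py | sum_evens
-- ===== SOURCE A (Python) =====
-- def sum_evens(n):
--   result = 0
--   count = 0
--   while count < 5:
--     if n % 2 == 0:
--       result += n
--       count += 1
--     n += 1
--   return result
-- ===== SOURCE B (Python) =====
-- def sum_evens(n):
--   # closed form: sum of the 5 even numbers starting at the first even >= n
--   if n % 2 == 0:
--     return 5 * n + 20
--   return 5 * n + 25
-- ===== Notes on version B (the rewrite author's own statement) =====
-- stated objective: simpler
-- what changed: Replaces the while-loop that scans integers collecting the required evens with a closed-form arithmetic-series formula branching once on parity.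
import Mathlib
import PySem

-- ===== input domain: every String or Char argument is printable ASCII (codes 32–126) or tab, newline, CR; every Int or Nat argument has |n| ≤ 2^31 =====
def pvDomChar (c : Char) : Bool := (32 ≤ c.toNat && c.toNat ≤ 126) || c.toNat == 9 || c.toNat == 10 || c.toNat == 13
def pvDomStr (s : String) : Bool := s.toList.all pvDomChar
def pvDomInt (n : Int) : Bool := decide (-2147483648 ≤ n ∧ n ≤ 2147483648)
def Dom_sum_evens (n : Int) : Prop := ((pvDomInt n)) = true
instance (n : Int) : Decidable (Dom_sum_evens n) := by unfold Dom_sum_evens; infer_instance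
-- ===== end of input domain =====

-- B replaces A's bounded scanning loop by a closed-form formula with one parity branch (objective: simpler).

-- ===== PORT A =====
-- literal port of A's while-loop: state (result, count, n); each iteration adds n if even
def sum_evensLoop (result count n : Int) : Int :=
  if _h : count < 5 then
    if n % 2 == 0 then sum_evensLoop (result + n) (count + 1) (n + 1)
    else sum_evensLoop result count (n + 1)
  else result
termination_by (10 - 2 * count + (if n % 2 == 0 then 0 else 1)).toNat
decreasing_by all_goals simp_all; omega

def sum_evens (n : Int) : Int := sum_evensLoop 0 0 n

-- ===== PORT B =====
def sum_evens_alt (n : Int) : Int :=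
  if n % 2 == 0 then 5 * n + 20 else 5 * n + 25

-- ===== PRECONDITION & SPEC =====
def Spec_sum_evens (n : Int) (out : Int) : Prop := out = sum_evens_alt n
instance (n : Int) (out : Int) : Decidable (Spec_sum_evens n out) := by unfold Spec_sum_evens; infer_instance

-- ===== CLAIM (what is proved, stated in full; the proofs are below) =====
def Claim_equal_sum_evens : Prop := ∀ (n : Int), Dom_sum_evens n → Spec_sum_evens n (sum_evens n)

-- ===== LEMMAS AND PROOFS =====
theorem loop_even (n r : Int) (h : n % 2 = 0) : sum_evensLoop r 0 n = r + 5 * n + 20 := by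
  have h1 : (n + 1) % 2 = 1 := by omega
  have h2 : (n + 2) % 2 = 0 := by omega
  have h3 : (n + 3) % 2 = 1 := by omega
  have h4 : (n + 4) % 2 = 0 := by omega
  have h5 : (n + 5) % 2 = 1 := by omega
  have h6 : (n + 6) % 2 = 0 := by omega
  have h7 : (n + 7) % 2 = 1 := by omega
  have h8 : (n + 8) % 2 = 0 := by omega
  rw [sum_evensLoop]; simp [h]
  rw [sum_evensLoop]; simp [show n + 1 + 1 = n + 2 by ring, h1]
  rw [sum_evensLoop]; simp [show n + 2 + 1 = n + 3 by ring, h2]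
  rw [sum_evensLoop]; simp [show n + 3 + 1 = n + 4 by ring, h3]
  rw [sum_evensLoop]; simp [show n + 4 + 1 = n + 5 by ring, h4]
  rw [sum_evensLoop]; simp [show n + 5 + 1 = n + 6 by ring, h5]
  rw [sum_evensLoop]; simp [show n + 6 + 1 = n + 7 by ring, h6]
  rw [sum_evensLoop]; simp [show n + 7 + 1 = n + 8 by ring, h7]
  rw [sum_evensLoop]; simp [h8]
  rw [sum_evensLoop]; simp
  ring

theorem loop_odd (n r : Int) (h : n % 2 = 1) : sum_evensLoop r 0 n = r + 5 * n + 25 := by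
  have h1 : (n + 1) % 2 = 0 := by omega
  rw [sum_evensLoop]; simp [h]
  rw [loop_even _ _ h1]; ring

-- ===== VERDICT (by name: the statement is the Claim_ definition above) =====
theorem sum_evens_spec : Claim_equal_sum_evens := by
  intro n _
  unfold Spec_sum_evens sum_evens sum_evens_alt
  rcases Int.emod_two_eq n with h | h
  · simp [h, loop_even n 0 h]
  · have : (n % 2 == 0) = false := by simp [h]
    rw [this, loop_odd n 0 h]; simp
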